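-- pv_equiv track=rewrite | github.com/pau1a/LMStudioPlayground | agent.py | valid_tool_choice
-- ===== SOURCE A (Python) =====
-- from typing import Any, Dict, Optional
--
-- WHITELIST_TOOLS = {"read_file", "write_file", "calc", "find_number"}
--
-- def valid_tool_choice(tool: str, args: Dict[str, Any]) -> bool:
--     if tool not in WHITELIST_TOOLS:
--         return False
--     if tool == "read_file" and "path" not in args:
--         return False
--     if tool == "write_file" and not all(k in args for k in ("path", "text")):
--         return False
--     if tool == "calc" and "expr" not in args:
--         return False
--     if tool == "find_number" and "text" not in args:
--         return False
--     return True
-- ===== SOURCE B (Python) =====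
-- from typing import Any, Dict
--
-- def valid_tool_choice(tool: str, args: Dict[str, Any]) -> bool:
--     # Inverted flow: derive from args the list of tools they enable,
--     # then simply test membership of the requested tool.
--     keys = set(args)
--     enabled = []
--     if "path" in keys:
--         enabled.append("read_file")
--         if "text" in keys:
--             enabled.append("write_file")
--     if "expr" in keys:
--         enabled.append("calc")
--     if "text" in keys:
--         enabled.append("find_number")
--     return tool in enabled
-- ===== Notes on version B (the rewrite author's own statement) =====
-- stated objective: alternative
-- what changed: The control flow is inverted: instead of branching on the tool name and checking its required keys, B first computes from the argument keys the list of tools those arguments enable, and then answers with a single membership test of the tool in that list; there is no per-tool branch on `tool` at all.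
import Mathlib
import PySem

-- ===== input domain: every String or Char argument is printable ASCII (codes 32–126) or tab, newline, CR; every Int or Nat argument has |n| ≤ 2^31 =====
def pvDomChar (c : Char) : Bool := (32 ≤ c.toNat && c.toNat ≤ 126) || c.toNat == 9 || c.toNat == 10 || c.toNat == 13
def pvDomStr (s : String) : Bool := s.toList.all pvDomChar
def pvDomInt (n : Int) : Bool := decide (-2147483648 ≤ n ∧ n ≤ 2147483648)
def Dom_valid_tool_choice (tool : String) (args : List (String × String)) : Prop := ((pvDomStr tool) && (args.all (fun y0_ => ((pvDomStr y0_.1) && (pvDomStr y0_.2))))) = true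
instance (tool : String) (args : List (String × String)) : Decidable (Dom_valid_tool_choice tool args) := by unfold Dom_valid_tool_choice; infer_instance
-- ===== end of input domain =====

-- B inverts the control flow: it computes from the argument keys the list of tools they enable and answers by one membership test of the tool, with no branch on the tool name (alternative).

-- ===== PORT A =====
-- Python set WHITELIST_TOOLS (distinct elements)
def WHITELIST_TOOLS : PySem.Set String :=
  PySem.Set.ofList ["read_file", "write_file", "calc", "find_number"]

def valid_tool_choice (tool : String) (args : List (String × String)) : Bool :=
  -- 'k in args' on a dict is key membership
  if ¬ (WHITELIST_TOOLS.contains tool) then false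
  else if tool == "read_file" && !(args.any (fun p => p.1 == "path")) then false
  else if tool == "write_file" && !(["path", "text"].all (fun k => args.any (fun p => p.1 == k))) then false
  else if tool == "calc" && !(args.any (fun p => p.1 == "expr")) then false
  else if tool == "find_number" && !(args.any (fun p => p.1 == "text")) then false
  else true

-- ===== PORT B =====
def valid_tool_choice_alt (tool : String) (args : List (String × String)) : Bool :=
  -- keys = set(args): the set of the dict's keys
  let keys : PySem.Set String := PySem.Set.ofList (args.map Prod.fst)
  -- build the list of enabled tools from the keys, then 'tool in enabled'
  let enabled : List String :=
    (if keys.contains "path" then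
       ["read_file"] ++ (if keys.contains "text" then ["write_file"] else [])
     else []) ++
    (if keys.contains "expr" then ["calc"] else []) ++
    (if keys.contains "text" then ["find_number"] else [])
  enabled.contains tool

-- ===== PRECONDITION & SPEC =====
def Spec_valid_tool_choice (tool : String) (args : List (String × String)) (out : Bool) : Prop := out = valid_tool_choice_alt tool args
instance (tool : String) (args : List (String × String)) (out : Bool) : Decidable (Spec_valid_tool_choice tool args out) := by unfold Spec_valid_tool_choice; infer_instance

-- ===== CLAIM (what is proved, stated in full; the proofs are below) =====
def Claim_equal_valid_tool_choice : Prop := ∀ (tool : String) (args : List (String × String)), Dom_valid_tool_choice tool args → Spec_valid_tool_choice tool args (valid_tool_choice tool args)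

-- ===== LEMMAS AND PROOFS =====

-- set(args).contains k is key membership: the same boolean as A's 'k in args' scan
theorem contains_keys (args : List (String × String)) (k : String) :
    (PySem.Set.ofList (args.map Prod.fst)).contains k = args.any (fun p => p.1 == k) := by
  rw [Bool.eq_iff_iff, PySem.Set.contains_iff, PySem.Set.mem_ofList]
  simp only [List.any_eq_true, List.mem_map, beq_iff_eq]

-- ===== VERDICT (by name: the statement is the Claim_ definition above) =====
theorem valid_tool_choice_spec : Claim_equal_valid_tool_choice := by
  intro tool args _
  unfold Spec_valid_tool_choice valid_tool_choice valid_tool_choice_alt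
  simp only [contains_keys]
  by_cases h1 : tool = "read_file"
  · subst h1
    cases hp : args.any (fun p => p.1 == "path") <;>
      cases ht : args.any (fun p => p.1 == "text") <;>
        simp [WHITELIST_TOOLS, PySem.Set.ofList, PySem.Set.contains, hp, ht]
  by_cases h2 : tool = "write_file"
  · subst h2
    cases hp : args.any (fun p => p.1 == "path") <;>
      cases ht : args.any (fun p => p.1 == "text") <;>
        simp [WHITELIST_TOOLS, PySem.Set.ofList, PySem.Set.contains, hp, ht]
  by_cases h3 : tool = "calc"
  · subst h3
    cases hp : args.any (fun p => p.1 == "path") <;>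
      cases ht : args.any (fun p => p.1 == "text") <;>
        cases he : args.any (fun p => p.1 == "expr") <;>
          simp [WHITELIST_TOOLS, PySem.Set.ofList, PySem.Set.contains, hp, ht]
  by_cases h4 : tool = "find_number"
  · subst h4
    cases hp : args.any (fun p => p.1 == "path") <;>
      cases ht : args.any (fun p => p.1 == "text") <;>
        simp [WHITELIST_TOOLS, PySem.Set.ofList, PySem.Set.contains, hp, ht]
  · simp [WHITELIST_TOOLS, PySem.Set.ofList, PySem.Set.contains, h1, h2, h3, h4]
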